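-- pv_equiv track=rewrite | github.com/cwphung/180Project | Speech/speech_recog.py | extract_command
-- ===== SOURCE A (Python) =====
-- def extract_command(word_list, keywords):
--     count = [0] * len(keywords)
--     for word_said in word_list:
--         for i, keyword_tuple in enumerate(keywords):
--             for keyword in keyword_tuple:
--                 if (word_said == keyword):
--                     count[i] += 1
--     max_val = max(count)
--     return None if max_val == 0 else keywords[count.index(max_val)][0]
-- ===== SOURCE B (Python) =====
-- def extract_command(word_list, keywords):
--     # Build a word-frequency table once, then score each keyword group by
--     # summing the frequencies of its keywords (one pass over the groups).
--     freq = {}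
--     for word in word_list:
--         freq[word] = freq.get(word, 0) + 1
--     best_idx = None
--     best_val = 0
--     for i, group in enumerate(keywords):
--         score = 0
--         for kw in group:
--             score += freq.get(kw, 0)
--         if score > best_val:
--             best_idx = i
--             best_val = score
--     return None if best_idx is None else keywords[best_idx][0]
-- ===== Notes on version B (the rewrite author's own statement) =====
-- stated objective: faster
-- what changed: Replaces the per-word scan over every keyword of every group by a word-frequency table built once, a per-group frequency-sum scoring pass, and a running strict-greater argmax instead of max()+list.index().
import Mathlib
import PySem

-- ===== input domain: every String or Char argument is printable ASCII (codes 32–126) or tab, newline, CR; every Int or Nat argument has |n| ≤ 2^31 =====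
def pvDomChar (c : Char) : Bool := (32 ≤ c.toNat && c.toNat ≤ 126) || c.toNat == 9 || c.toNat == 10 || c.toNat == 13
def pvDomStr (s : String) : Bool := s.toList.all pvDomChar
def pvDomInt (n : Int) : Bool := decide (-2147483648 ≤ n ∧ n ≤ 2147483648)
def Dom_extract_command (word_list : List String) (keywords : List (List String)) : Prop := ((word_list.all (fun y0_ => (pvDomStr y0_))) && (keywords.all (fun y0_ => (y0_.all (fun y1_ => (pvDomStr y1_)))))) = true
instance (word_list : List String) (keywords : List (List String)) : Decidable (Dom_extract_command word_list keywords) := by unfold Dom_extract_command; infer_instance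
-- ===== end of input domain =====

-- B replaces A's per-word scan over all keywords by a frequency table built once,
-- a per-group frequency-sum score and a running strict-greater argmax (objective: faster).

-- ===== PORT A =====
def extract_command (word_list : List String) (keywords : List (List String)) : Option String :=
  let count : List Int := List.replicate keywords.length 0
  let count := word_list.foldl (fun count word_said =>
    (PySem.List.enumerate keywords 0).foldl (fun count p =>
      p.2.foldl (fun count keyword =>
        if word_said == keyword then
          PySem.List.pySetD count p.1 (PySem.List.pyGetD count p.1 0 + 1)
        else count) count) count) count
  match PySem.List.max? count (fun y => y) with
  | none => none  -- max([]) raises ValueError; excluded by Pre_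
  | some max_val =>
    if max_val == 0 then none
    else
      match PySem.List.index? count max_val with
      | none => none  -- unreachable: max_val ∈ count
      | some j =>
        match PySem.List.pyGet? keywords (Int.ofNat j) with
        | none => none  -- unreachable IndexError branch
        | some g => PySem.List.pyGet? g 0

-- ===== PORT B =====
def extract_command_alt (word_list : List String) (keywords : List (List String)) : Option String :=
  let freq : PySem.Dict String Int :=
    word_list.foldl (fun d w => d.insert w (d.getD w 0 + 1)) PySem.Dict.empty
  let best := (PySem.List.enumerate keywords 0).foldl
    (fun (b : Option Int × Int) p =>
      let score := p.2.foldl (fun s kw => s + freq.getD kw 0) 0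
      if score > b.2 then (some p.1, score) else b)
    (none, 0)
  match best.1 with
  | none => none
  | some i =>
    match PySem.List.pyGet? keywords i with
    | none => none
    | some g => PySem.List.pyGet? g 0

-- ===== PRECONDITION & SPEC =====
-- Pre_ excludes only keywords = [], where A raises ValueError (max of empty list).
def Pre_extract_command (word_list : List String) (keywords : List (List String)) : Prop :=
  keywords ≠ []
instance (word_list : List String) (keywords : List (List String)) : Decidable (Pre_extract_command word_list keywords) := by unfold Pre_extract_command; infer_instance
def pvWitness_extract_command : List String × List (List String) := (["go"], [["go"], ["stop"]])

def Spec_extract_command (word_list : List String) (keywords : List (List String)) (out : Option String) : Prop := out = extract_command_alt word_list keywords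
instance (word_list : List String) (keywords : List (List String)) (out : Option String) : Decidable (Spec_extract_command word_list keywords out) := by unfold Spec_extract_command; infer_instance

-- ===== CLAIM (what is proved, stated in full; the proofs are below) =====
def Claim_equal_extract_command : Prop := ∀ (word_list : List String) (keywords : List (List String)), Dom_extract_command word_list keywords → Pre_extract_command word_list keywords → Spec_extract_command word_list keywords (extract_command word_list keywords)

-- ===== LEMMAS AND PROOFS =====

theorem pv_getD_append (pre : List Int) (c : Int) (post : List Int) :
    (pre ++ c :: post).getD pre.length 0 = c := by
  induction pre with
  | nil => rfl
  | cons x pre ih => simpa using ih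
theorem pv_set_append (pre : List Int) (c : Int) (post : List Int) (v : Int) :
    (pre ++ c :: post).set pre.length v = pre ++ v :: post := by
  induction pre with
  | nil => rfl
  | cons x pre ih => simpa using ih
theorem pv_inner (w : String) (g : List String) :
    ∀ (pre : List Int) (c : Int) (post : List Int),
    g.foldl (fun cn kw => if w == kw then
        cn.set pre.length (cn.getD pre.length 0 + 1) else cn)
      (pre ++ c :: post)
      = pre ++ (c + (g.count w : Int)) :: post := by
  induction g with
  | nil => intro pre c post; simp
  | cons kw g ih =>
    intro pre c post
    simp only [List.foldl_cons]
    by_cases h : w == kw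
    · rw [if_pos h, pv_getD_append, pv_set_append, ih pre (c+1) post]
      have : (kw :: g).count w = g.count w + 1 := by
        simp [(beq_iff_eq.mp h).symm]
      rw [this]; push_cast; ring_nf
    · rw [if_neg (by simpa using h), ih pre c post]
      have : (kw :: g).count w = g.count w := by
        have : (kw == w) = false := by
          by_cases hk : kw = w
          · exact absurd (by simp [hk]) h
          · simpa using hk
        simp [List.count_cons, this]
      rw [this]
theorem pv_middle (w : String) :
    ∀ (ks : List (List String)) (pre post : List Int), post.length = ks.length →
    (PySem.List.enumerate ks ((pre.length : Nat) : Int)).foldl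
      (fun cn p => p.2.foldl (fun cn kw => if w == kw then
          PySem.List.pySetD cn p.1 (PySem.List.pyGetD cn p.1 0 + 1) else cn) cn)
      (pre ++ post)
      = pre ++ (post.zip ks).map (fun q => q.1 + (q.2.count w : Int)) := by
  intro ks
  induction ks with
  | nil => intro pre post h; simp at h; simp [h, PySem.List.enumerate_nil]
  | cons g ks ih =>
    intro pre post h
    cases post with
    | nil => simp at h
    | cons c post =>
      simp only [List.length_cons] at h
      rw [PySem.List.enumerate_cons, List.foldl_cons]
      simp only [PySem.List.pySetD_natCast, PySem.List.pyGetD_natCast]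
      rw [pv_inner w g pre c post]
      have hlen : ((pre.length : Int) + 1) = (((pre ++ [c + (g.count w : Int)]).length : Nat) : Int) := by
        simp
      have hsplit : pre ++ (c + (g.count w : Int)) :: post
          = (pre ++ [c + (g.count w : Int)]) ++ post := by simp
      rw [hlen, hsplit, ih (pre ++ [c + (g.count w : Int)]) post (by omega)]
      simp
theorem pv_zip_map_self (ks : List (List String)) (f : List String → Int) :
    (ks.map f).zip ks = ks.map (fun g => (f g, g)) := by
  induction ks with
  | nil => rfl
  | cons g ks ih => simp [ih]

theorem pv_sum_indicator (kw : String) (wl : List String) :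
    (wl.map (fun w => if kw == w then (1:Int) else 0)).sum = (wl.count kw : Int) := by
  induction wl with
  | nil => simp
  | cons a wl ihw =>
    rw [List.count_cons]
    simp only [List.map_cons, List.sum_cons, ihw]
    by_cases hk : kw = a
    · have h2 : (a == kw) = true := by simp [hk]
      simp [hk, h2]
      ring
    · have h1 : (kw == a) = false := by simpa using hk
      have h2 : (a == kw) = false := by simpa using Ne.symm hk
      simp [h1, h2]

def pvF (wl : List String) (g : List String) : Int := (g.map (fun kw => (wl.count kw : Int))).sum

theorem pv_outer (ks : List (List String)) :
    ∀ (wl : List String) (f : List String → Int),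
    wl.foldl (fun count word_said =>
      (PySem.List.enumerate ks 0).foldl (fun count p =>
        p.2.foldl (fun count keyword =>
          if word_said == keyword then
            PySem.List.pySetD count p.1 (PySem.List.pyGetD count p.1 0 + 1)
          else count) count) count) (ks.map f)
      = ks.map (fun g => f g + (wl.map (fun w => (g.count w : Int))).sum) := by
  intro wl
  induction wl with
  | nil => intro f; simp
  | cons w wl ih =>
    intro f
    rw [List.foldl_cons]
    have hm := pv_middle w ks [] (ks.map f) (by simp)
    rw [List.nil_append] at hm
    rw [show ((List.length ([] : List Int) : Nat) : Int) = (0:Int) from rfl] at hm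
    rw [hm, List.nil_append, pv_zip_map_self ks f, List.map_map]
    have : ((fun q : Int × List String => q.1 + (q.2.count w : Int)) ∘ fun g => (f g, g))
        = fun g => f g + (g.count w : Int) := rfl
    rw [this, ih (fun g => f g + (g.count w : Int))]
    apply List.map_congr_left
    intro g _
    simp only [List.map_cons, List.sum_cons]
    ring
theorem pv_sum_map_add (l : List String) (x y : String → Int) :
    (l.map (fun a => x a + y a)).sum = (l.map x).sum + (l.map y).sum := by
  induction l with
  | nil => simp
  | cons a l ih => simp [ih]; ring
theorem pv_swap (wl : List String) (g : List String) :
    (wl.map (fun w => (g.count w : Int))).sum = pvF wl g := by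
  unfold pvF
  induction g with
  | nil => simp
  | cons kw g ih =>
    have hc : ∀ w : String, ((kw :: g).count w : Int) = (g.count w : Int) + (if kw == w then 1 else 0) := by
      intro w; rw [List.count_cons]; split <;> push_cast <;> ring_nf
    calc (wl.map (fun w => ((kw :: g).count w : Int))).sum
        = (wl.map (fun w => (g.count w : Int) + (if kw == w then 1 else 0))).sum := by
          apply congrArg; exact List.map_congr_left (fun w _ => hc w)
      _ = (wl.map (fun w => (g.count w : Int))).sum + (wl.map (fun w => if kw == w then (1:Int) else 0)).sum :=
          pv_sum_map_add wl _ _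
      _ = _ := by
          rw [ih]
          simp only [List.map_cons, List.sum_cons]
          rw [pv_sum_indicator kw wl]; ring

theorem pv_replicate (ks : List (List String)) :
    List.replicate ks.length (0 : Int) = ks.map (fun _ => (0:Int)) := by
  induction ks with
  | nil => rfl
  | cons g ks ih => rw [List.length_cons, List.replicate_succ, List.map_cons, ih]

theorem pv_countA (wl : List String) (ks : List (List String)) :
    wl.foldl (fun count word_said =>
      (PySem.List.enumerate ks 0).foldl (fun count p =>
        p.2.foldl (fun count keyword =>
          if word_said == keyword then
            PySem.List.pySetD count p.1 (PySem.List.pyGetD count p.1 0 + 1)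
          else count) count) count) (List.replicate ks.length (0 : Int))
      = ks.map (pvF wl) := by
  rw [pv_replicate ks, pv_outer ks wl (fun _ => 0)]
  apply List.map_congr_left
  intro g _
  rw [pv_swap wl g]
  ring
theorem pv_F_nonneg (wl g : List String) : 0 ≤ pvF wl g := by
  unfold pvF
  induction g with
  | nil => simp
  | cons kw g ih => simp only [List.map_cons, List.sum_cons]; positivity

theorem pv_best_le (wl : List String) :
    ∀ (ks : List (List String)) (s : Int) (b : Option Int) (v : Int),
    (∀ g ∈ ks, pvF wl g ≤ v) →
    (PySem.List.enumerate ks s).foldl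
      (fun (b : Option Int × Int) p => if pvF wl p.2 > b.2 then (some p.1, pvF wl p.2) else b) (b, v)
      = (b, v) := by
  intro ks
  induction ks with
  | nil => intro s b v _; simp [PySem.List.enumerate_nil]
  | cons g ks ih =>
    intro s b v h
    rw [PySem.List.enumerate_cons, List.foldl_cons]
    have hg : ¬ (pvF wl g > v) := not_lt.mpr (h g (List.mem_cons_self ..))
    rw [if_neg hg]
    exact ih (s+1) b v (fun g' hg' => h g' (List.mem_cons_of_mem _ hg'))

theorem pv_best_gt (wl : List String) :
    ∀ (ks : List (List String)) (s : Int) (b : Option Int) (v m : Int),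
    (∀ g ∈ ks, pvF wl g ≤ m) → (∃ g ∈ ks, pvF wl g = m) → v < m →
    ∃ j : Nat, PySem.List.index? (ks.map (pvF wl)) m = some j ∧
      (PySem.List.enumerate ks s).foldl
        (fun (b : Option Int × Int) p => if pvF wl p.2 > b.2 then (some p.1, pvF wl p.2) else b) (b, v)
        = (some (s + (j : Int)), m) := by
  intro ks
  induction ks with
  | nil => intro s b v m _ hmem _; simp at hmem
  | cons g ks ih =>
    intro s b v m hle hmem hv
    rw [PySem.List.enumerate_cons, List.foldl_cons]
    by_cases hg : pvF wl g = m
    · refine ⟨0, ?_, ?_⟩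
      · rw [List.map_cons, hg]; exact PySem.List.index?_cons_self ..
      · rw [if_pos (by omega : pvF wl g > v), hg]
        rw [pv_best_le wl ks (s+1) (some s) m (fun g' hg' => hle g' (List.mem_cons_of_mem _ hg'))]
        simp
    · have hmem' : ∃ g' ∈ ks, pvF wl g' = m := by
        obtain ⟨g', hg', he⟩ := hmem
        rcases List.mem_cons.mp hg' with rfl | h'
        · exact absurd he hg
        · exact ⟨g', h', he⟩
      have hle' : ∀ g' ∈ ks, pvF wl g' ≤ m := fun g' hg' => hle g' (List.mem_cons_of_mem _ hg')
      have hglt : pvF wl g < m := lt_of_le_of_ne (hle g (List.mem_cons_self ..)) hg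
      have hidx : ∀ j : Nat, PySem.List.index? (ks.map (pvF wl)) m = some j →
          PySem.List.index? ((g :: ks).map (pvF wl)) m = some (j+1) := by
        intro j hj
        rw [List.map_cons, PySem.List.index?_cons_of_ne (List.map (pvF wl) ks) hg, hj]
        rfl
      by_cases hgv : pvF wl g > v
      · rw [if_pos hgv]
        obtain ⟨j, hj, hfold⟩ := ih (s+1) (some s) (pvF wl g) m hle' hmem' hglt
        exact ⟨j+1, hidx j hj, by rw [hfold]; congr 1; congr 1; push_cast; ring⟩
      · rw [if_neg hgv]
        obtain ⟨j, hj, hfold⟩ := ih (s+1) b v m hle' hmem' hv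
        exact ⟨j+1, hidx j hj, by rw [hfold]; congr 1; congr 1; push_cast; ring⟩
theorem pv_alt_fold (wl : List String) (ks : List (List String)) :
    (PySem.List.enumerate ks 0).foldl
      (fun (b : Option Int × Int) p =>
        let score := p.2.foldl (fun s kw =>
          s + (wl.foldl (fun d w => d.insert w (d.getD w 0 + 1)) PySem.Dict.empty).getD kw 0) 0
        if score > b.2 then (some p.1, score) else b) (none, 0)
      = (PySem.List.enumerate ks 0).foldl
        (fun (b : Option Int × Int) p => if pvF wl p.2 > b.2 then (some p.1, pvF wl p.2) else b) (none, 0) := by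
  have hstep : ∀ (g : List String),
      g.foldl (fun s kw =>
        s + (wl.foldl (fun d w => d.insert w (d.getD w 0 + 1)) PySem.Dict.empty).getD kw 0) 0
      = pvF wl g := by
    intro g
    have hfreq : (wl.foldl (fun d w => d.insert w (d.getD w 0 + 1)) PySem.Dict.empty)
        = PySem.Dict.counter wl := PySem.Dict.foldl_insert_getD_add_one_eq_counter ..
    rw [hfreq]
    have : g.foldl (fun s kw => s + (PySem.Dict.counter wl).getD kw 0) 0
        = g.foldl (fun s kw => s + (wl.count kw : Int)) 0 := by
      apply PySem.List.foldl_congr_mem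
      intro acc kw _
      rw [PySem.Dict.getD_counter]
    rw [this, PySem.List.foldl_add]
    unfold pvF; ring
  apply congrArg (fun f => List.foldl f ((none, 0) : Option Int × Int) (PySem.List.enumerate ks 0))
  funext b p
  simp only [hstep p.2]

theorem pv_main (wl : List String) (ks : List (List String)) (hpre : ks ≠ []) :
    extract_command wl ks = extract_command_alt wl ks := by
  unfold extract_command extract_command_alt
  simp only [pv_countA, pv_alt_fold]
  rcases h : PySem.List.max? (ks.map (pvF wl)) (fun y => y) with _ | m
  · exact absurd (List.map_eq_nil_iff.mp ((PySem.List.max?_eq_none_iff ..).mp h)) hpre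
  · have hle : ∀ g ∈ ks, pvF wl g ≤ m := by
      intro g hg
      simpa using PySem.List.max?_isMax h (pvF wl g) (List.mem_map_of_mem hg)
    have hmem : ∃ g ∈ ks, pvF wl g = m := by
      simpa using List.mem_map.mp (PySem.List.max?_mem h)
    dsimp only
    by_cases hm : m = 0
    · subst hm
      rw [pv_best_le wl ks 0 none 0 hle]
      simp
    · have hpos : 0 < m := by
        obtain ⟨g, _, hg⟩ := hmem
        have := pv_F_nonneg wl g
        omega
      obtain ⟨j, hj, hfold⟩ := pv_best_gt wl ks 0 none 0 m hle hmem hpos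
      rw [hfold, hj]
      have : (m == 0) = false := by simpa using hm
      simp only [this, Bool.false_eq_true, if_false]
      have : Int.ofNat j = 0 + (j : Int) := by simp
      rw [← this]

-- ===== VERDICT (by name: the statement is the Claim_ definition above) =====
theorem extract_command_spec : Claim_equal_extract_command := by
  intro wl ks _ hpre
  unfold Spec_extract_command
  exact pv_main wl ks hpre
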